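-- pv_equiv track=rewrite | github.com/diana-nurbakova/propaganda-narrative-classification | src/analysis/semantic_confusion_analysis.py | build_label_texts
-- ===== SOURCE A (Python) =====
-- from typing import Dict, List, Optional, Set, Tuple
--
-- def build_label_texts(labels: List[str], definitions: Dict[str, str]) -> List[str]:
--     """
--     Build text representations for each label by combining the label name
--     with its definition for richer semantic signal.
--     """
--     texts = []
--     for label in labels:
--         # Try to find definition with the full label
--         defn = definitions.get(label, "")
--         if not defn:
--             # Try shorter forms
--             parts = label.split(": ")
--             for i in range(len(parts)):
--                 shorter = ": ".join(parts[i:])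
--                 if shorter in definitions:
--                     defn = definitions[shorter]
--                     break
--         # Combine label name and definition
--         text = f"{label}. {defn}" if defn else label
--         texts.append(text)
--     return texts
-- ===== SOURCE B (Python) =====
-- def build_label_texts(labels, definitions):
--     """
--     Build text representations for each label by combining the label name
--     with its definition for richer semantic signal.
--
--     Rewrite: instead of splitting and re-joining slices longest-first with a
--     break, grow the suffixes of each label short-to-long and keep the
--     definition at the longest suffix present (membership-based, so an
--     empty-string definition still yields just the label).
--     """
--     def best_definition(label):
--         found = None
--         suffix = None
--         for part in reversed(label.split(": ")):
--             suffix = part if suffix is None else part + ": " + suffix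
--             if suffix in definitions:
--                 found = definitions[suffix]
--         return found
--     return [f"{label}. {d}" if (d := best_definition(label)) else label
--             for label in labels]
-- ===== Notes on version B (the rewrite author's own statement) =====
-- stated objective: simpler
-- what changed: Replaces A's dict.get-then-longest-first scan over slice-and-rejoined suffix candidates (with break) by a single short-to-long walk that rebuilds each suffix incrementally from the reversed parts and keeps the definition at the longest suffix present in the dict.
import Mathlib
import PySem

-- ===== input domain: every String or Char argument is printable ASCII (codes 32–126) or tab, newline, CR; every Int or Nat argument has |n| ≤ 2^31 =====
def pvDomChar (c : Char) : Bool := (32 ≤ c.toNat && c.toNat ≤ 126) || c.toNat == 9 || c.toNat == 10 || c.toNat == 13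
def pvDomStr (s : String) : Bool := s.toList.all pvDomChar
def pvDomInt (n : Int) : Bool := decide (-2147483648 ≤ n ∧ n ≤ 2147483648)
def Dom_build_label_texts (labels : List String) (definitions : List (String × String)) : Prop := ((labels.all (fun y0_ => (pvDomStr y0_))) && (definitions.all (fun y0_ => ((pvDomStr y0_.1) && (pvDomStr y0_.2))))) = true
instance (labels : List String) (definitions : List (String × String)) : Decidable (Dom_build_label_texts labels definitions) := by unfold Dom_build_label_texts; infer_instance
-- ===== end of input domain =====

-- B replaces A's get-then-longest-first scan over slice-joined suffix candidates (with break)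
-- by one short-to-long suffix walk over the reversed parts keeping the longest hit: simpler, one pass.

-- ===== PORT A =====
-- inner loop 'for i in range(len(parts)): shorter = ": ".join(parts[i:]); if shorter in definitions: defn = definitions[shorter]; break'
-- (entered with defn == ""; falling off the loop leaves defn == "")
def pvScanA (d : PySem.Dict String String) (parts : List String) : List Int → String
  | [] => ""
  | i :: is =>
    let shorter := PySem.Str.join ": " (PySem.List.slice parts (some i) none)
    match PySem.Dict.get? d shorter with
    | some v => v
    | none => pvScanA d parts is

def build_label_texts (labels : List String) (definitions : List (String × String)) : List String :=
  let d : PySem.Dict String String := PySem.Dict.mk definitions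
  labels.foldl (fun texts label =>
    let defn0 := PySem.Dict.getD d label ""
    let defn :=
      if defn0 == "" then
        let parts := (PySem.Str.split? label ": ").getD []
        pvScanA d parts (PySem.List.pyRange 0 (parts.length : Int) 1)
      else defn0
    let text := if defn == "" then label else label ++ ". " ++ defn
    texts ++ [text]) []

-- ===== PORT B =====
-- loop body of best_definition: 'suffix = part if suffix is None else part + ": " + suffix; if suffix in definitions: found = definitions[suffix]'
def pvStep (d : PySem.Dict String String) (acc : Option String × Option String) (part : String) : Option String × Option String :=
  let suffix := match acc.1 with
    | none => part
    | some s => part ++ ": " ++ s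
  let found := match PySem.Dict.get? d suffix with
    | some v => some v
    | none => acc.2
  (some suffix, found)

def build_label_texts_alt (labels : List String) (definitions : List (String × String)) : List String :=
  let d : PySem.Dict String String := PySem.Dict.mk definitions
  labels.map (fun label =>
    let parts := (PySem.Str.split? label ": ").getD []
    match (parts.reverse.foldl (pvStep d) (none, none)).2 with
    | some dfn => if dfn == "" then label else label ++ ". " ++ dfn
    | none => label)

-- ===== PRECONDITION & SPEC =====
def Spec_build_label_texts (labels : List String) (definitions : List (String × String)) (out : List String) : Prop := out = build_label_texts_alt labels definitions
instance (labels : List String) (definitions : List (String × String)) (out : List String) : Decidable (Spec_build_label_texts labels definitions out) := by unfold Spec_build_label_texts; infer_instance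

-- ===== CLAIM (what is proved, stated in full; the proofs are below) =====
def Claim_equal_build_label_texts : Prop := ∀ (labels : List String) (definitions : List (String × String)), Dom_build_label_texts labels definitions → Spec_build_label_texts labels definitions (build_label_texts labels definitions)

-- ===== LEMMAS AND PROOFS =====

-- clean recursive version of PySem.Chars.splitOn for the separator ": "
def pvSplit : List Char → List (List Char)
  | [] => [[]]
  | c :: rest =>
    if [':', ' '].isPrefixOf (c :: rest) then
      [] :: pvSplit (List.drop 2 (c :: rest))
    else
      match pvSplit rest with
      | [] => [[c]]   -- unreachable: pvSplit never returns []
      | x :: xs => (c :: x) :: xs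
termination_by l => l.length
decreasing_by all_goals simp

def pvMergeHead (pre : List Char) : List (List Char) → List (List Char)
  | [] => [pre]
  | x :: xs => (pre ++ x) :: xs

theorem pvSplit_ne_nil (l : List Char) : pvSplit l ≠ [] := by
  cases l with
  | nil => simp [pvSplit]
  | cons c rest =>
    rw [pvSplit]
    split
    · simp
    · cases h : pvSplit rest <;> simp

theorem pv_go_acc (fuel : Nat) : ∀ (l cur : List Char) (acc : List (List Char)),
    PySem.Chars.splitOn.go [':', ' '] fuel l cur acc
      = acc.reverse ++ PySem.Chars.splitOn.go [':', ' '] fuel l cur [] := by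
  induction fuel with
  | zero =>
    intro l cur acc
    rw [PySem.Chars.splitOn.go.eq_def, PySem.Chars.splitOn.go.eq_def]
    simp
  | succ n ih =>
    intro l cur acc
    cases l with
    | nil =>
      rw [PySem.Chars.splitOn.go.eq_def, PySem.Chars.splitOn.go.eq_def]
      simp
    | cons c rest =>
      rw [PySem.Chars.splitOn.go.eq_def]
      conv_rhs => rw [PySem.Chars.splitOn.go.eq_def]
      simp only []
      split
      · rw [ih _ [] (cur.reverse :: acc), ih _ [] ([cur.reverse])]
        simp
      · rw [ih _ (c :: cur) acc]

theorem pv_go_spec (fuel : Nat) : ∀ (l cur : List Char), l.length < fuel →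
    PySem.Chars.splitOn.go [':', ' '] fuel l cur []
      = pvMergeHead cur.reverse (pvSplit l) := by
  induction fuel with
  | zero => intro l cur h; omega
  | succ n ih =>
    intro l cur h
    cases l with
    | nil =>
      rw [PySem.Chars.splitOn.go.eq_def]
      simp [pvSplit, pvMergeHead]
    | cons c rest =>
      rw [PySem.Chars.splitOn.go.eq_def]
      simp only []
      rw [pvSplit]
      split
      · rw [pv_go_acc]
        have hsep : ([':', ' '] : List Char).length = 2 := rfl
        rw [hsep]
        generalize hl2 : List.drop 2 (c :: rest) = l2
        have hlen : l2.length < n := by rw [← hl2]; simp at h ⊢; omega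
        rw [ih _ [] hlen]
        cases hy : pvSplit l2 with
        | nil => exact absurd hy (pvSplit_ne_nil _)
        | cons y ys => simp [pvMergeHead]
      · rw [ih _ (c :: cur) (by simp at h ⊢; omega)]
        cases hs : pvSplit rest with
        | nil => exact absurd hs (pvSplit_ne_nil _)
        | cons x xs => simp [pvMergeHead]

theorem pv_splitOn_eq (l : List Char) : PySem.Chars.splitOn l [':', ' '] = pvSplit l := by
  have h0 : PySem.Chars.splitOn l [':', ' ']
      = PySem.Chars.splitOn.go [':', ' '] (l.length + 1) l [] [] := rfl
  rw [h0, pv_go_spec (l.length + 1) l [] (by omega)]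
  cases hs : pvSplit l with
  | nil => exact absurd hs (pvSplit_ne_nil _)
  | cons x xs => simp [pvMergeHead]

theorem pv_join_pvSplit : ∀ (n : Nat) (l : List Char), l.length ≤ n →
    PySem.Chars.join [':', ' '] (pvSplit l) = l := by
  intro n
  induction n with
  | zero =>
    intro l h
    have : l = [] := by cases l <;> simp_all
    subst this
    simp [pvSplit, PySem.Chars.join_singleton]
  | succ n ih =>
    intro l h
    cases l with
    | nil => simp [pvSplit, PySem.Chars.join_singleton]
    | cons c rest =>
      rw [pvSplit]
      split
      · next hpre =>
        obtain ⟨t, ht⟩ := List.isPrefixOf_iff_prefix.mp hpre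
        obtain ⟨y, ys, hy⟩ : ∃ y ys, pvSplit (List.drop 2 (c :: rest)) = y :: ys := by
          cases hs : pvSplit (List.drop 2 (c :: rest)) with
          | nil => exact absurd hs (pvSplit_ne_nil _)
          | cons y ys => exact ⟨y, ys, rfl⟩
        rw [hy, PySem.Chars.join_cons_cons, ← hy,
            ih _ (by simp at h ⊢; omega)]
        have hdt : List.drop 2 (c :: rest) = t := by rw [← ht]; simp
        rw [hdt, ← ht]
        rfl
      · cases hs : pvSplit rest with
        | nil => exact absurd hs (pvSplit_ne_nil _)
        | cons x xs =>
          have ihr := ih rest (by simp at h ⊢; omega)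
          rw [hs] at ihr
          cases xs with
          | nil =>
            rw [PySem.Chars.join_singleton]
            rw [PySem.Chars.join_singleton] at ihr
            rw [ihr]
          | cons z zs =>
            rw [PySem.Chars.join_cons_cons]
            rw [PySem.Chars.join_cons_cons] at ihr
            rw [List.cons_append, List.cons_append, ihr]

-- the parts list both ports compute: label.split(": ")
def pvParts (label : String) : List String := (PySem.Str.split? label ": ").getD []

theorem pvParts_eq (label : String) :
    pvParts label = (pvSplit label.toList).map String.ofList := by
  simp [pvParts, PySem.Str.split?, PySem.Chars.split?, pv_splitOn_eq]

theorem pvParts_ne_nil (label : String) : pvParts label ≠ [] := by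
  rw [pvParts_eq]
  intro h
  exact pvSplit_ne_nil _ (by simpa using h)

theorem pv_join_parts (label : String) : PySem.Str.join ": " (pvParts label) = label := by
  apply String.toList_inj.mp
  rw [PySem.Str.toList_join, pvParts_eq, List.map_map]
  have : (String.toList ∘ String.ofList) = id := by
    funext l; simp
  rw [this, List.map_id]
  exact pv_join_pvSplit label.toList.length label.toList le_rfl

theorem pv_strJoin_singleton (p : String) : PySem.Str.join ": " [p] = p := by
  apply String.toList_inj.mp
  rw [PySem.Str.toList_join]
  simp [PySem.Chars.join_singleton]

theorem pv_strJoin_cons_cons (p q : String) (rest : List String) :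
    PySem.Str.join ": " (p :: q :: rest) = p ++ ": " ++ PySem.Str.join ": " (q :: rest) := by
  apply String.toList_inj.mp
  rw [PySem.Str.toList_join]
  simp only [List.map_cons]
  rw [PySem.Chars.join_cons_cons]
  simp [PySem.Str.toList_join]

-- the value A's inner scan finds: first (longest) suffix of parts present in d
def pvFirstHit (d : PySem.Dict String String) : List String → Option String
  | [] => none
  | p :: rest =>
    match PySem.Dict.get? d (PySem.Str.join ": " (p :: rest)) with
    | some v => some v
    | none => pvFirstHit d rest

theorem pv_fold_eq (d : PySem.Dict String String) :
    ∀ (rest : List String) (p : String),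
    ((p :: rest).reverse.foldl (pvStep d) (none, none))
      = (some (PySem.Str.join ": " (p :: rest)), pvFirstHit d (p :: rest)) := by
  intro rest
  induction rest with
  | nil =>
    intro p
    simp only [List.reverse_cons, List.reverse_nil, List.nil_append, List.foldl_cons,
      List.foldl_nil, pvStep, pvFirstHit, pv_strJoin_singleton]
  | cons q rest ih =>
    intro p
    have hrev : (p :: q :: rest).reverse = (q :: rest).reverse ++ [p] := by simp
    rw [hrev, List.foldl_append, ih q]
    simp only [List.foldl_cons, List.foldl_nil, pvStep]
    rw [← pv_strJoin_cons_cons]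
    conv_rhs => rw [pvFirstHit]

theorem pv_scan_eq (d : PySem.Dict String String) (parts : List String) :
    ∀ (n k : Nat), parts.length - k ≤ n → k ≤ parts.length →
    pvScanA d parts (PySem.List.pyRange (k : Int) (parts.length : Int) 1)
      = (pvFirstHit d (parts.drop k)).getD "" := by
  intro n
  induction n with
  | zero =>
    intro k h hk
    have hke : k = parts.length := by omega
    subst hke
    rw [PySem.List.pyRange_one_eq_nil (le_refl _)]
    simp [pvScanA, pvFirstHit]
  | succ n ih =>
    intro k h hk
    by_cases hlt : k < parts.length
    · rw [PySem.List.pyRange_one_cons (by exact_mod_cast hlt)]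
      rw [pvScanA]
      have hdrop : parts.drop k = parts[k] :: parts.drop (k + 1) :=
        List.drop_eq_getElem_cons hlt
      rw [hdrop, pvFirstHit, ← hdrop]
      have hslice : PySem.List.slice parts (some (k : Int)) none = parts.drop k :=
        PySem.List.slice_from_natCast parts k
      rw [hslice]
      cases hres : PySem.Dict.get? d (PySem.Str.join ": " (parts.drop k)) with
      | some v => simp
      | none =>
        simp only []
        have : ((k : Int) + 1) = ((k + 1 : Nat) : Int) := by push_cast; ring
        rw [this, ih (k + 1) (by omega) (by omega)]
    · have hke : k = parts.length := by omega
      subst hke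
      rw [PySem.List.pyRange_one_eq_nil (le_refl _)]
      simp [pvScanA, pvFirstHit]

-- per-label equality of the two loop bodies
theorem pv_text_eq (d : PySem.Dict String String) (label : String) :
    (let defn0 := PySem.Dict.getD d label ""
     let defn :=
       if defn0 == "" then
         let parts := (PySem.Str.split? label ": ").getD []
         pvScanA d parts (PySem.List.pyRange 0 ((parts.length : Nat) : Int) 1)
       else defn0
     if defn == "" then label else label ++ ". " ++ defn)
    = (let parts := (PySem.Str.split? label ": ").getD []
       match (parts.reverse.foldl (pvStep d) (none, none)).2 with
       | some dfn => if dfn == "" then label else label ++ ". " ++ dfn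
       | none => label) := by
  obtain ⟨p, rest, hpr⟩ : ∃ p rest, pvParts label = p :: rest := by
    cases hs : pvParts label with
    | nil => exact absurd hs (pvParts_ne_nil label)
    | cons p rest => exact ⟨p, rest, rfl⟩
  have hjoin : PySem.Str.join ": " (p :: rest) = label := by
    rw [← hpr]; exact pv_join_parts label
  have hscan : pvScanA d (p :: rest) (PySem.List.pyRange 0 (((p :: rest).length : Nat) : Int) 1)
      = (pvFirstHit d (p :: rest)).getD "" := by
    simpa using pv_scan_eq d (p :: rest) (p :: rest).length 0 (by omega) (by omega)
  have hFH : pvFirstHit d (p :: rest)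
      = (match PySem.Dict.get? d label with
         | some v => some v
         | none => pvFirstHit d rest) := by
    rw [pvFirstHit, hjoin]
  show (let defn0 := PySem.Dict.getD d label ""
        let defn :=
          if defn0 == "" then
            pvScanA d (pvParts label) (PySem.List.pyRange 0 (((pvParts label).length : Nat) : Int) 1)
          else defn0
        if defn == "" then label else label ++ ". " ++ defn)
      = (match ((pvParts label).reverse.foldl (pvStep d) (none, none)).2 with
         | some dfn => if dfn == "" then label else label ++ ". " ++ dfn
         | none => label)
  rw [hpr, pv_fold_eq d rest p, hscan, hFH]
  simp only [PySem.Dict.getD]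
  cases hget : PySem.Dict.get? d label with
  | none =>
    cases hfr : pvFirstHit d rest with
    | none => simp
    | some w => simp
  | some v =>
    by_cases hv : v = "" <;> simp [hv]

-- ===== VERDICT (by name: the statement is the Claim_ definition above) =====
theorem build_label_texts_spec : Claim_equal_build_label_texts := by
  intro labels definitions _
  show build_label_texts labels definitions = build_label_texts_alt labels definitions
  unfold build_label_texts build_label_texts_alt
  simp only [PySem.List.foldl_append_singleton_eq_map, List.nil_append]
  apply List.map_congr_left
  intro label _
  exact pv_text_eq (PySem.Dict.mk definitions) label
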